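-- pv_equiv track=rewrite | github.com/vincentcaptain/molecule_analyzer | Part_2_python/log_read_reacts.py | StringBondedAtom
-- ===== SOURCE A (Python) =====
-- def StringBondedAtom(string,m, store, visited, atom_list):
--     if visited[m] == 1:
--         return string
--     string += '(' + str(atom_list[m-1])
--     visited[m] = 1
--     for i in range(len(store[m])):
--         string = StringBondedAtom(string, store[m][i], store, visited, atom_list)
--     string += ')'
--     return string
-- ===== SOURCE B (Python) =====
-- def StringBondedAtom(string, m, store, visited, atom_list):
--     # Iterative DFS with an explicit work stack instead of recursion.
--     # Note: like A, mutates `visited` in place; the equivalence claim is about the return value.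
--     if visited[m] == 1:
--         return string
--     out = []
--     stack = [(True, m)]
--     while stack:
--         is_visit, n = stack.pop()
--         if not is_visit:
--             out.append(')')
--         elif visited[n] != 1:
--             visited[n] = 1
--             out.append('(' + str(atom_list[n - 1]))
--             stack.append((False, 0))
--             for c in reversed(store[n]):
--                 stack.append((True, c))
--     return string + ''.join(out)
-- ===== Notes on version B (the rewrite author's own statement) =====
-- stated objective: alternative
-- what changed: A's recursive DFS (string built by += through the call stack) is replaced by an iterative DFS over an explicit work stack of visit/close items, collecting the emitted pieces in a list joined once at the end.
-- outside the precondition, e.g. on StringBondedAtom('s', 1, {1: [], 2: [3]}, {1: 0, 2: 0}, ['C']): A returns 's(C)', B returns 's(C)'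
import Mathlib
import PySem

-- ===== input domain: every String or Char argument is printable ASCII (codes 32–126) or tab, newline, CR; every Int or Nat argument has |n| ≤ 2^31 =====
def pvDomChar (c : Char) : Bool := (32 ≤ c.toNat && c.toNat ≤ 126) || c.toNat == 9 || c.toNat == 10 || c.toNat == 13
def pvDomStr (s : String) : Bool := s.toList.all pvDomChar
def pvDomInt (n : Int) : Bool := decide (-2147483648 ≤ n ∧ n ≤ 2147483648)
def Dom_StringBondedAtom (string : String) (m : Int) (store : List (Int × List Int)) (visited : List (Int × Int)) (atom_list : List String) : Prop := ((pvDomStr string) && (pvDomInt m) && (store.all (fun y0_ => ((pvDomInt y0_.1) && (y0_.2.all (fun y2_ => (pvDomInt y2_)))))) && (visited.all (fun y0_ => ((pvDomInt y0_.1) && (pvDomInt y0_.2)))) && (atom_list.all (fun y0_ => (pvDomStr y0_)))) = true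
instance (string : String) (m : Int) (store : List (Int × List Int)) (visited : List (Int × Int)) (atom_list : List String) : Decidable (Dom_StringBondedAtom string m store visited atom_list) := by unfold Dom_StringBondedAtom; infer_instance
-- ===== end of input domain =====

-- B replaces A's recursive DFS by an iterative DFS driven by an explicit work stack (alternative
-- decomposition, same asymptotic cost). Like A, the Python B mutates `visited` in place; the
-- equivalence proved here is about the RETURN value only.

-- Helpers needed by the termination argument of pvGoB (cited by name in its decreasing_by).
-- `pvUnvis d` counts the entries of d whose key does not currently look up to 1.
def pvUnvis (d : PySem.Dict Int Int) : Nat :=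
  (d.items.map Prod.fst).countP (fun k => !(d.get? k == some 1))

theorem pvCountP_lt {α : Type} (l : List α) (p q : α → Bool)
    (hpq : ∀ a ∈ l, q a = true → p a = true) (x : α) (hx : x ∈ l)
    (hpx : p x = true) (hqx : ¬ q x = true) : l.countP q < l.countP p := by
  induction l with
  | nil => cases hx
  | cons a t ih =>
    rcases List.mem_cons.mp hx with h | h
    · subst h
      have hmono : t.countP q ≤ t.countP p :=
        List.countP_mono_left (fun a ha => hpq a (List.mem_cons_of_mem _ ha))
      simp only [List.countP_cons]
      rw [if_pos hpx, if_neg hqx]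
      omega
    · have := ih (fun a ha hq => hpq a (List.mem_cons_of_mem _ ha) hq) h
      simp only [List.countP_cons]
      by_cases hqa : q a = true
      · rw [if_pos hqa, if_pos (hpq a (List.mem_cons_self) hqa)]; omega
      · rw [if_neg hqa]; split <;> omega

theorem pvKeys_insert_of_contains (d : PySem.Dict Int Int) (n : Int) (hc : d.contains n = true) :
    (d.insert n 1).items.map Prod.fst = d.items.map Prod.fst := by
  rw [PySem.Dict.items_insert_of_contains d 1 hc, List.map_map]
  apply List.map_congr_left
  intro p _
  by_cases hk : p.1 = n
  · simp [Function.comp, hk]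
  · simp [Function.comp, hk]

theorem pvUnvis_insert_lt (d : PySem.Dict Int Int) (n val : Int)
    (h : d.get? n = some val) (hval : val ≠ 1) : pvUnvis (d.insert n 1) < pvUnvis d := by
  have hc : d.contains n = true := by rw [PySem.Dict.contains_eq_isSome_get?, h]; rfl
  unfold pvUnvis
  rw [pvKeys_insert_of_contains d n hc]
  apply pvCountP_lt (x := n)
  · intro k _ hq
    by_cases hk : k = n
    · exfalso
      rw [hk, PySem.Dict.get?_insert] at hq
      simp at hq
    · rw [PySem.Dict.get?_insert, if_neg hk] at hq
      exact hq
  · exact List.mem_map_of_mem (PySem.Dict.mem_items_of_get?_eq_some d h)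
  · simp [h, hval]
  · rw [PySem.Dict.get?_insert]
    simp

theorem pvFoldlMaxInit {α : Type} (l : List α) (f : α → Nat) :
    ∀ a : Nat, a ≤ l.foldl (fun b y => max b (f y)) a := by
  induction l with
  | nil => intro a; exact le_rfl
  | cons x t ih => intro a; exact le_trans (le_max_left _ _) (ih (max a (f x)))

theorem pvFoldlMax_mem {α : Type} (l : List α) (f : α → Nat) (x : α) (hx : x ∈ l) :
    ∀ a : Nat, f x ≤ l.foldl (fun b y => max b (f y)) a := by
  induction l with
  | nil => cases hx
  | cons y t ih =>
    intro a
    rcases List.mem_cons.mp hx with h | h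
    · subst h
      exact le_trans (le_max_right _ _) (pvFoldlMaxInit t f (max a (f x)))
    · exact ih h (max a (f y))

def pvMaxChild (store : PySem.Dict Int (List Int)) : Nat :=
  store.items.foldl (fun a p => max a p.2.length) 0

theorem pvChildLen_le (store : PySem.Dict Int (List Int)) (n : Int) (l : List Int)
    (h : store.get? n = some l) : l.length ≤ pvMaxChild store :=
  pvFoldlMax_mem store.items (fun p => p.2.length) (n, l)
    (PySem.Dict.mem_items_of_get?_eq_some store h) 0

theorem pvLenFoldlCons {α β : Type} (l : List α) (g : α → β) (init : List β) :
    (l.foldl (fun st c => g c :: st) init).length = l.length + init.length := by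
  induction l generalizing init with
  | nil => simp
  | cons x t ih => simp only [List.foldl_cons, ih, List.length_cons]; omega

-- ===== PORT A =====
-- recursive DFS, fuel-indexed (the fuel visited.length + 1 always suffices inside Pre_; the
-- `none` branches are where the Python raises KeyError/IndexError — excluded by Pre_).
def pvGoA (st : PySem.Dict Int (List Int)) (al : List String) :
    Nat → String → Int → PySem.Dict Int Int → String × PySem.Dict Int Int
  | 0, s, _, v => (s, v)
  | fuel+1, s, m, v =>
    match v.get? m with
    | none => (s, v)                                    -- visited[m] : KeyError
    | some val =>
      if val = 1 then (s, v)
      else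
        match PySem.List.pyGet? al (m - 1) with
        | none => (s, v)                                -- atom_list[m-1] : IndexError
        | some a =>
          let s1 := s ++ "(" ++ a
          let v1 := v.insert m 1
          match st.get? m with
          | none => (s1, v1)                            -- store[m] : KeyError
          | some children =>
            let p := children.foldl (fun (p : String × PySem.Dict Int Int) c =>
              pvGoA st al fuel p.1 c p.2) (s1, v1)
            (p.1 ++ ")", p.2)

def StringBondedAtom (string : String) (m : Int) (store : List (Int × List Int)) (visited : List (Int × Int)) (atom_list : List String) : String :=
  (pvGoA (PySem.Dict.mk store) atom_list (visited.length + 1) string m (PySem.Dict.mk visited)).1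

-- ===== PORT B =====
-- iterative DFS over an explicit work stack ((true, n) = visit n, (false, _) = emit ')'),
-- accumulating the emitted pieces in a list that is joined at the end (Source B's `out`).
def pvGoB (st : PySem.Dict Int (List Int)) (al : List String) :
    List (Bool × Int) → List String → PySem.Dict Int Int → List String × PySem.Dict Int Int
  | [], acc, v => (acc, v)
  | (false, _) :: rest, acc, v => pvGoB st al rest (acc ++ [")"]) v
  | (true, n) :: rest, acc, v =>
    match hv : v.get? n with
    | none => (acc, v)                                  -- visited[n] : KeyError
    | some val =>
      if hval : val = 1 then pvGoB st al rest acc v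
      else
        match PySem.List.pyGet? al (n - 1) with
        | none => (acc, v)                              -- atom_list[n-1] : IndexError
        | some a =>
          match hs : st.get? n with
          | none => (acc ++ ["(" ++ a], v.insert n 1)   -- store[n] : KeyError
          | some children =>
            pvGoB st al
              (children.reverse.foldl (fun stck c => ((true, c) : Bool × Int) :: stck)
                (((false, (0:Int)) : Bool × Int) :: rest))
              (acc ++ ["(" ++ a]) (v.insert n 1)
termination_by stack _ v => (pvMaxChild st + 2) * pvUnvis v + stack.length
decreasing_by
  · simp only [List.length_cons]; omega
  · simp only [List.length_cons]; omega
  · rw [pvLenFoldlCons]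
    have h1 : pvUnvis (v.insert n 1) < pvUnvis v := pvUnvis_insert_lt v n val hv hval
    have h2 : children.length ≤ pvMaxChild st := pvChildLen_le st n children hs
    have h3 : (pvMaxChild st + 2) * (pvUnvis (v.insert n 1) + 1) ≤ (pvMaxChild st + 2) * pvUnvis v :=
      Nat.mul_le_mul_left _ h1
    have h4 : (pvMaxChild st + 2) * (pvUnvis (v.insert n 1) + 1)
        = (pvMaxChild st + 2) * pvUnvis (v.insert n 1) + (pvMaxChild st + 2) := by ring
    simp only [List.length_cons, List.length_reverse]
    omega

def StringBondedAtom_alt (string : String) (m : Int) (store : List (Int × List Int)) (visited : List (Int × Int)) (atom_list : List String) : String :=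
  match (PySem.Dict.mk visited).get? m with
  | none => string                                      -- visited[m] : KeyError, excluded by Pre_
  | some val =>
    if val = 1 then string
    else string ++ PySem.Str.join ""
      (pvGoB (PySem.Dict.mk store) atom_list [((true, m) : Bool × Int)] [] (PySem.Dict.mk visited)).1

-- ===== PRECONDITION & SPEC =====
-- Pre_ excludes the inputs where A raises (KeyError on visited[·] or store[·], IndexError on
-- atom_list[·-1]).  It is stated over ALL nodes listed in store (plus m) rather than only the
-- reachable ones, so it also excludes some inputs on which A returns (an ill-formed node that is
-- never reached); see claim.json "cites".
def Pre_StringBondedAtom (string : String) (m : Int) (store : List (Int × List Int)) (visited : List (Int × Int)) (atom_list : List String) : Prop :=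
  ((PySem.Dict.mk visited).get? m).isSome = true ∧
  ((PySem.Dict.mk visited).get? m = some 1 ∨
    ∀ n ∈ m :: store.flatMap (fun p => p.2),
      ((PySem.Dict.mk visited).get? n).isSome = true ∧
      ((PySem.Dict.mk store).get? n).isSome = true ∧
      (PySem.List.pyGet? atom_list (n - 1)).isSome = true)
instance (string : String) (m : Int) (store : List (Int × List Int)) (visited : List (Int × Int)) (atom_list : List String) : Decidable (Pre_StringBondedAtom string m store visited atom_list) := by unfold Pre_StringBondedAtom; infer_instance

def pvWitness_StringBondedAtom : String × Int × (List (Int × List Int)) × (List (Int × Int)) × List String :=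
  ("s", 1, [(1, [2]), (2, [])], [(1, 0), (2, 0)], ["C", "H"])

def Spec_StringBondedAtom (string : String) (m : Int) (store : List (Int × List Int)) (visited : List (Int × Int)) (atom_list : List String) (out : String) : Prop := out = StringBondedAtom_alt string m store visited atom_list
instance (string : String) (m : Int) (store : List (Int × List Int)) (visited : List (Int × Int)) (atom_list : List String) (out : String) : Decidable (Spec_StringBondedAtom string m store visited atom_list out) := by unfold Spec_StringBondedAtom; infer_instance

-- ===== CLAIM (what is proved, stated in full; the proofs are below) =====
def Claim_equal_StringBondedAtom : Prop := ∀ (string : String) (m : Int) (store : List (Int × List Int)) (visited : List (Int × Int)) (atom_list : List String), Dom_StringBondedAtom string m store visited atom_list → Pre_StringBondedAtom string m store visited atom_list → Spec_StringBondedAtom string m store visited atom_list (StringBondedAtom string m store visited atom_list)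

-- ===== LEMMAS AND PROOFS =====

theorem pvWitness_ok :
    Dom_StringBondedAtom (pvWitness_StringBondedAtom.1) (pvWitness_StringBondedAtom.2.1) (pvWitness_StringBondedAtom.2.2.1) (pvWitness_StringBondedAtom.2.2.2.1) (pvWitness_StringBondedAtom.2.2.2.2) ∧
    Pre_StringBondedAtom (pvWitness_StringBondedAtom.1) (pvWitness_StringBondedAtom.2.1) (pvWitness_StringBondedAtom.2.2.1) (pvWitness_StringBondedAtom.2.2.2.1) (pvWitness_StringBondedAtom.2.2.2.2) := by
  decide

theorem pvIntercalateNil (l : List (List Char)) : ([] : List Char).intercalate l = l.flatten := by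
  induction l with
  | nil => simp [List.intercalate]
  | cons x t ih =>
    cases t with
    | nil => simp [List.intercalate]
    | cons y u =>
      simp only [List.intercalate, List.intersperse] at ih ⊢
      simp [ih]

theorem pvJoin (l : List String) :
    PySem.Str.join "" l = String.ofList (l.map String.toList).flatten := by
  simp [PySem.Str.join, PySem.Chars.join, pvIntercalateNil]

theorem pvJoin_append (a b : List String) :
    PySem.Str.join "" (a ++ b) = PySem.Str.join "" a ++ PySem.Str.join "" b := by
  simp [pvJoin, ← String.ofList_append]

theorem pvJoin_singleton (s : String) : PySem.Str.join "" [s] = s := by simp [pvJoin]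

theorem pvJoin_nil : PySem.Str.join "" [] = "" := by simp [pvJoin]

theorem pvInsert_isSome (v : PySem.Dict Int Int) (n k : Int)
    (h : (v.get? k).isSome = true) : ((v.insert n 1).get? k).isSome = true := by
  rw [PySem.Dict.get?_insert]
  split
  · rfl
  · exact h

theorem pvUnvis_insert_le (v : PySem.Dict Int Int) (n : Int) :
    pvUnvis (v.insert n 1) ≤ pvUnvis v := by
  by_cases hc : v.contains n = true
  · unfold pvUnvis
    rw [pvKeys_insert_of_contains v n hc]
    apply List.countP_mono_left
    intro k _ hq
    by_cases hk : k = n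
    · exfalso; rw [hk, PySem.Dict.get?_insert] at hq; simp at hq
    · rw [PySem.Dict.get?_insert, if_neg hk] at hq; exact hq
  · have hc' : v.contains n = false := by simpa using hc
    have hnone : v.get? n = none := by
      have h := PySem.Dict.contains_eq_isSome_get? v n
      rw [hc'] at h
      cases hg : v.get? n
      · rfl
      · rw [hg] at h; simp at h
    unfold pvUnvis
    rw [PySem.Dict.items_insert_of_not_contains v 1 hc', List.map_append, List.countP_append]
    have hkeys : ∀ k ∈ v.items.map Prod.fst, k ≠ n := by
      intro k hk hkn
      subst hkn
      have hmem : k ∈ v.keys := by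
        simpa [PySem.Dict.keys] using hk
      exact ((PySem.Dict.get?_eq_none_iff_not_mem_keys v k).mp hnone) hmem
    have h1 : (v.items.map Prod.fst).countP (fun k => !((v.insert n 1).get? k == some 1))
        = (v.items.map Prod.fst).countP (fun k => !(v.get? k == some 1)) := by
      apply List.countP_congr
      intro k hk
      rw [PySem.Dict.get?_insert, if_neg (hkeys k hk)]
    have h2 : ([(n, (1:Int))].map Prod.fst).countP (fun k => !((v.insert n 1).get? k == some 1)) = 0 := by
      simp [PySem.Dict.get?_insert]
    omega

theorem pvRevFoldlCons {α β : Type} (l : List α) (g : α → β) (init : List β) :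
    l.reverse.foldl (fun st c => g c :: st) init = l.map g ++ init := by
  rw [List.foldl_reverse]
  induction l with
  | nil => rfl
  | cons x t ih => simp only [List.foldr_cons, List.map_cons, List.cons_append, ih]

theorem pvGoB_nil (st : PySem.Dict Int (List Int)) (al : List String) (acc : List String) (v : PySem.Dict Int Int) :
    pvGoB st al [] acc v = (acc, v) := by
  rw [pvGoB]

theorem pvGoB_close (st : PySem.Dict Int (List Int)) (al : List String) (b : Int) (rest : List (Bool × Int)) (acc : List String) (v : PySem.Dict Int Int) :
    pvGoB st al ((false, b) :: rest) acc v = pvGoB st al rest (acc ++ [")"]) v := by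
  rw [pvGoB]

theorem pvGoB_visit_skip (st : PySem.Dict Int (List Int)) (al : List String) (n : Int) (rest : List (Bool × Int)) (acc : List String) (v : PySem.Dict Int Int)
    (hv : v.get? n = some 1) :
    pvGoB st al ((true, n) :: rest) acc v = pvGoB st al rest acc v := by
  rw [pvGoB]
  split
  · next h => rw [hv] at h; cases h
  · next val h =>
    rw [hv] at h
    injection h with h
    subst h
    rw [dif_pos rfl]

theorem pvGoB_visit_go (st : PySem.Dict Int (List Int)) (al : List String) (n val : Int) (rest : List (Bool × Int)) (acc : List String) (v : PySem.Dict Int Int)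
    (a : String) (children : List Int)
    (hv : v.get? n = some val) (hval : val ≠ 1)
    (ha : PySem.List.pyGet? al (n - 1) = some a) (hs : st.get? n = some children) :
    pvGoB st al ((true, n) :: rest) acc v
      = pvGoB st al (children.map (fun c => ((true, c) : Bool × Int)) ++ ((false, (0:Int)) : Bool × Int) :: rest)
          (acc ++ ["(" ++ a]) (v.insert n 1) := by
  rw [pvGoB]
  split
  · next h => rw [hv] at h; cases h
  · next val' h =>
    rw [hv] at h
    injection h with h
    subst h
    rw [dif_neg hval, ha]
    split
    · next h2 => cases h2
    · next a2 h2 =>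
      injection h2 with h2
      subst h2
      split
      · next h3 => rw [hs] at h3; cases h3
      · next ch h3 =>
        rw [hs] at h3
        injection h3 with h3
        subst h3
        rw [pvRevFoldlCons]

theorem pvGoA_skip (st : PySem.Dict Int (List Int)) (al : List String) (f : Nat) (s : String) (n : Int) (v : PySem.Dict Int Int)
    (hv : v.get? n = some 1) :
    pvGoA st al (f + 1) s n v = (s, v) := by
  simp [pvGoA, hv]

theorem pvGoA_go (st : PySem.Dict Int (List Int)) (al : List String) (f : Nat) (s : String) (n val : Int) (v : PySem.Dict Int Int)
    (a : String) (children : List Int)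
    (hv : v.get? n = some val) (hval : val ≠ 1)
    (ha : PySem.List.pyGet? al (n - 1) = some a) (hs : st.get? n = some children) :
    pvGoA st al (f + 1) s n v
      = ((children.foldl (fun (p : String × PySem.Dict Int Int) c => pvGoA st al f p.1 c p.2) (s ++ "(" ++ a, v.insert n 1)).1 ++ ")",
         (children.foldl (fun (p : String × PySem.Dict Int Int) c => pvGoA st al f p.1 c p.2) (s ++ "(" ++ a, v.insert n 1)).2) := by
  simp [pvGoA, hv, hval, ha, hs]

theorem pvGoA_state (st : PySem.Dict Int (List Int)) (al : List String) :
    ∀ (fuel : Nat) (s : String) (n : Int) (v : PySem.Dict Int Int),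
      pvUnvis ((pvGoA st al fuel s n v).2) ≤ pvUnvis v ∧
      ∀ k, (v.get? k).isSome = true → (((pvGoA st al fuel s n v).2).get? k).isSome = true := by
  intro fuel
  induction fuel with
  | zero =>
    intro s n v
    exact ⟨le_rfl, fun k h => h⟩
  | succ f ih =>
    have chain : ∀ (l : List Int) (p : String × PySem.Dict Int Int),
        pvUnvis ((l.foldl (fun (p : String × PySem.Dict Int Int) c => pvGoA st al f p.1 c p.2) p).2) ≤ pvUnvis p.2 ∧
        ∀ k, (p.2.get? k).isSome = true →
          (((l.foldl (fun (p : String × PySem.Dict Int Int) c => pvGoA st al f p.1 c p.2) p).2).get? k).isSome = true := by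
      intro l
      induction l with
      | nil => intro p; exact ⟨le_rfl, fun k h => h⟩
      | cons c t iht =>
        intro p
        obtain ⟨h1, h2⟩ := ih p.1 c p.2
        obtain ⟨h3, h4⟩ := iht (pvGoA st al f p.1 c p.2)
        exact ⟨le_trans h3 h1, fun k hk => h4 k (h2 k hk)⟩
    intro s n v
    show pvUnvis ((pvGoA st al (f + 1) s n v).2) ≤ pvUnvis v ∧ _
    simp only [pvGoA]
    cases hv : v.get? n with
    | none => exact ⟨le_rfl, fun k h => h⟩
    | some val =>
      dsimp only
      by_cases hval : val = 1
      · rw [if_pos hval]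
        exact ⟨le_rfl, fun k h => h⟩
      · rw [if_neg hval]
        cases ha : PySem.List.pyGet? al (n - 1) with
        | none => exact ⟨le_rfl, fun k h => h⟩
        | some a =>
          dsimp only
          cases hs : st.get? n with
          | none =>
            exact ⟨pvUnvis_insert_le v n, fun k h => pvInsert_isSome v n k h⟩
          | some children =>
            dsimp only
            obtain ⟨h1, h2⟩ := chain children (s ++ "(" ++ a, v.insert n 1)
            refine ⟨le_trans h1 (pvUnvis_insert_le v n), fun k hk => h2 k (pvInsert_isSome v n k hk)⟩

theorem pvCore (st : PySem.Dict Int (List Int)) (al : List String) (nodes : List Int)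
    (hstatic : ∀ n ∈ nodes, (st.get? n).isSome = true ∧ (PySem.List.pyGet? al (n - 1)).isSome = true)
    (hclosed : ∀ n l, st.get? n = some l → ∀ c ∈ l, c ∈ nodes) :
    ∀ (K : Nat) (v : PySem.Dict Int Int), pvUnvis v ≤ K →
      (∀ j ∈ nodes, (v.get? j).isSome = true) →
      ∀ n ∈ nodes, ∀ (f : Nat), pvUnvis v < f →
      ∀ (s : String) (rest : List (Bool × Int)) (acc : List String),
      ∃ out : List String,
        pvGoB st al ((true, n) :: rest) acc v
          = pvGoB st al rest (acc ++ out) ((pvGoA st al f s n v).2) ∧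
        (pvGoA st al f s n v).1 = s ++ PySem.Str.join "" out := by
  intro K
  induction K using Nat.strong_induction_on with
  | _ K ih =>
    intro v hK hInv n hn f hf s rest acc
    have hvs := hInv n hn
    obtain ⟨val, hv⟩ : ∃ val, v.get? n = some val := by
      cases h : v.get? n
      · rw [h] at hvs; simp at hvs
      · exact ⟨_, rfl⟩
    cases f with
    | zero => omega
    | succ f' =>
      by_cases hval : val = 1
      · subst hval
        refine ⟨[], ?_, ?_⟩
        · rw [pvGoB_visit_skip st al n rest acc v hv, List.append_nil,
            pvGoA_skip st al f' s n v hv]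
        · rw [pvGoA_skip st al f' s n v hv, pvJoin_nil, String.append_empty]
      · obtain ⟨hsSt, hsAl⟩ := hstatic n hn
        obtain ⟨children, hs⟩ : ∃ l, st.get? n = some l := by
          cases h : st.get? n
          · rw [h] at hsSt; simp at hsSt
          · exact ⟨_, rfl⟩
        obtain ⟨a, ha⟩ : ∃ a, PySem.List.pyGet? al (n - 1) = some a := by
          cases h : PySem.List.pyGet? al (n - 1)
          · rw [h] at hsAl; simp at hsAl
          · exact ⟨_, rfl⟩
        have hlt1 : pvUnvis (v.insert n 1) < pvUnvis v := pvUnvis_insert_lt v n val hv hval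
        have chain : ∀ (l : List Int), (∀ c ∈ l, c ∈ nodes) →
            ∀ (w : PySem.Dict Int Int) (s2 : String) (tail : List (Bool × Int)) (acc2 : List String),
            pvUnvis w < pvUnvis v → (∀ j ∈ nodes, (w.get? j).isSome = true) →
            ∃ outs : List String,
              pvGoB st al (l.map (fun c => ((true, c) : Bool × Int)) ++ tail) acc2 w
                = pvGoB st al tail (acc2 ++ outs)
                    ((l.foldl (fun (p : String × PySem.Dict Int Int) c => pvGoA st al f' p.1 c p.2) (s2, w)).2) ∧
              (l.foldl (fun (p : String × PySem.Dict Int Int) c => pvGoA st al f' p.1 c p.2) (s2, w)).1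
                = s2 ++ PySem.Str.join "" outs := by
          intro l
          induction l with
          | nil =>
            intro _ w s2 tail acc2 _ _
            refine ⟨[], by simp, ?_⟩
            rw [pvJoin_nil, String.append_empty]
            rfl
          | cons c t iht =>
            intro hcl w s2 tail acc2 hw hInvW
            have hc : c ∈ nodes := hcl c (List.mem_cons_self)
            have hf' : pvUnvis w < f' := by omega
            obtain ⟨outc, hB1, hA1⟩ := ih (pvUnvis w) (by omega) w le_rfl hInvW c hc f' hf' s2
              (t.map (fun c => ((true, c) : Bool × Int)) ++ tail) acc2
            obtain ⟨hmono, hpres⟩ := pvGoA_state st al f' s2 c w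
            obtain ⟨outs, hB2, hA2⟩ := iht (fun x hx => hcl x (List.mem_cons_of_mem _ hx))
              ((pvGoA st al f' s2 c w).2) ((pvGoA st al f' s2 c w).1) tail (acc2 ++ outc)
              (lt_of_le_of_lt hmono hw) (fun j hj => hpres j (hInvW j hj))
            refine ⟨outc ++ outs, ?_, ?_⟩
            · rw [List.map_cons, List.cons_append, hB1, List.foldl_cons]
              have hassoc : acc2 ++ (outc ++ outs) = (acc2 ++ outc) ++ outs :=
                (List.append_assoc _ _ _).symm
              rw [hassoc]
              exact hB2
            · rw [List.foldl_cons]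
              rw [pvJoin_append, ← String.append_assoc, ← hA1]
              exact hA2
        obtain ⟨outs, hB2, hA2⟩ := chain children (hclosed n children hs) (v.insert n 1)
          (s ++ "(" ++ a) (((false, (0:Int)) : Bool × Int) :: rest) (acc ++ ["(" ++ a]) hlt1
          (fun j hj => pvInsert_isSome v n j (hInv j hj))
        refine ⟨("(" ++ a) :: (outs ++ [")"]), ?_, ?_⟩
        · rw [pvGoB_visit_go st al n val rest acc v a children hv hval ha hs, hB2, pvGoB_close,
            pvGoA_go st al f' s n val v a children hv hval ha hs]
          congr 1
          simp
        · rw [pvGoA_go st al f' s n val v a children hv hval ha hs]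
          dsimp only
          rw [hA2]
          rw [show ("(" ++ a) :: (outs ++ [")"]) = ["(" ++ a] ++ outs ++ [")"] from by simp]
          rw [pvJoin_append, pvJoin_append, pvJoin_singleton, pvJoin_singleton]
          simp [String.append_assoc]

-- ===== VERDICT (by name: the statement is the Claim_ definition above) =====
theorem StringBondedAtom_spec : Claim_equal_StringBondedAtom := by
  intro string m store visited atom_list _ hPre
  obtain ⟨hsome, hrest⟩ := hPre
  obtain ⟨val, hv⟩ : ∃ val, (PySem.Dict.mk visited).get? m = some val := by
    cases h : (PySem.Dict.mk visited).get? m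
    · rw [h] at hsome; simp at hsome
    · exact ⟨_, rfl⟩
  show StringBondedAtom string m store visited atom_list
      = StringBondedAtom_alt string m store visited atom_list
  by_cases hval : val = 1
  · subst hval
    rw [StringBondedAtom, StringBondedAtom_alt, hv,
      pvGoA_skip (PySem.Dict.mk store) atom_list visited.length string m (PySem.Dict.mk visited) hv]
    rfl
  · have hAll : ∀ n ∈ m :: store.flatMap (fun p => p.2),
        ((PySem.Dict.mk visited).get? n).isSome = true ∧
        ((PySem.Dict.mk store).get? n).isSome = true ∧
        (PySem.List.pyGet? atom_list (n - 1)).isSome = true := by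
      rcases hrest with h1 | h2
      · exfalso; rw [hv] at h1; injection h1 with h1; exact hval h1
      · exact h2
    have hstatic : ∀ n ∈ m :: store.flatMap (fun p => p.2),
        ((PySem.Dict.mk store).get? n).isSome = true ∧
        (PySem.List.pyGet? atom_list (n - 1)).isSome = true :=
      fun n hn => ⟨(hAll n hn).2.1, (hAll n hn).2.2⟩
    have hclosed : ∀ n l, (PySem.Dict.mk store).get? n = some l →
        ∀ c ∈ l, c ∈ m :: store.flatMap (fun p => p.2) := by
      intro n l hnl c hc
      apply List.mem_cons_of_mem
      exact List.mem_flatMap.mpr ⟨(n, l), PySem.Dict.mem_items_of_get?_eq_some _ hnl, hc⟩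
    have hInv : ∀ j ∈ m :: store.flatMap (fun p => p.2),
        (((PySem.Dict.mk visited)).get? j).isSome = true := fun j hj => (hAll j hj).1
    have hfuel : pvUnvis (PySem.Dict.mk visited) < visited.length + 1 := by
      have h1 : pvUnvis (PySem.Dict.mk visited) ≤ ((PySem.Dict.mk visited).items.map Prod.fst).length :=
        List.countP_le_length
      have h2 : ((PySem.Dict.mk visited).items.map Prod.fst).length = visited.length := by
        rw [List.length_map]
      omega
    obtain ⟨out, hB, hA⟩ := pvCore (PySem.Dict.mk store) atom_list
      (m :: store.flatMap (fun p => p.2)) hstatic hclosed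
      (pvUnvis (PySem.Dict.mk visited)) (PySem.Dict.mk visited) le_rfl hInv
      m (List.mem_cons_self) (visited.length + 1) hfuel string [] []
    rw [StringBondedAtom, StringBondedAtom_alt, hv]
    dsimp only
    rw [if_neg hval, hA]
    rw [pvGoB_nil] at hB
    rw [hB]
    rfl
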